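-- pv_equiv track=rewrite | github.com/soumya26-pi/extraction-tool | RSM_st.py | find_lexical_sequence
-- ===== SOURCE A (Python) =====
-- def find_lexical_sequence(indexes, w_indexes):
--     if len(indexes) == 1:
--         return w_indexes
--     out = []
--     s = indexes[0]
--     for idx, i in enumerate(indexes[1:]):
--         if s - i == -1:
--             out.append(w_indexes[idx + 1])
--         else:
--             out = []
--         s = i
--     if len(out) > 0:
--         out = [out[0] - 1] + out
--     return out
-- ===== SOURCE B (Python) =====
-- def find_lexical_sequence(indexes, w_indexes):
--     if len(indexes) == 1:
--         return w_indexes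
--     # walk backwards over the trailing maximal run of consecutive indexes
--     run = []
--     j = len(indexes) - 1
--     while j >= 1 and indexes[j] == indexes[j - 1] + 1:
--         run.append(w_indexes[j])
--         j -= 1
--     run.reverse()
--     if run:
--         return [run[0] - 1] + run
--     return []
-- ===== Notes on version B (the rewrite author's own statement) =====
-- stated objective: faster
-- what changed: Instead of A's forward scan over the whole list that repeatedly builds and resets a run buffer, B walks backwards from the end collecting only the trailing maximal run of consecutive indexes, reverses it and prepends its first value minus one.
import Mathlib
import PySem

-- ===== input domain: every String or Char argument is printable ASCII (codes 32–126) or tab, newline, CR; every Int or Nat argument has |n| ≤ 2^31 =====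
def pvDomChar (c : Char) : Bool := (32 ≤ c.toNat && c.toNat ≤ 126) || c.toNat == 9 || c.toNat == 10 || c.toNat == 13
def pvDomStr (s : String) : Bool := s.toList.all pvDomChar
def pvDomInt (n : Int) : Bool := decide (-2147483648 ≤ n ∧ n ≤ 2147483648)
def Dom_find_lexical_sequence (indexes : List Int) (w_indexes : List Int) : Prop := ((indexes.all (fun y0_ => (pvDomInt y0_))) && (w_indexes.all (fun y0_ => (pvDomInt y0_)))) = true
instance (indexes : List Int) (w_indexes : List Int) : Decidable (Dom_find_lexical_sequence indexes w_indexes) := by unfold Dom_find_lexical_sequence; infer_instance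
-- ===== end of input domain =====

-- B replaces A's full forward scan (building and resetting a run buffer) by a backward walk
-- that collects only the trailing run of consecutive indexes; equivalence of return values is proved.

-- ===== PORT A =====
-- one loop step of A's for-body: state is (out, s), idx the enumerate counter
def flsStep (w : List Int) (st : List Int × Int) (idx : Nat) (i : Int) : List Int × Int :=
  if st.2 - i = -1 then (st.1 ++ [PySem.List.pyGetD w ((idx : Int) + 1) 0], i) else ([], i)

def flsLoop (w : List Int) : List Int → Nat → List Int × Int → List Int × Int
  | [], _, st => st
  | i :: rest, idx, st => flsLoop w rest (idx + 1) (flsStep w st idx i)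

def find_lexical_sequence (indexes : List Int) (w_indexes : List Int) : List Int :=
  if indexes.length = 1 then w_indexes
  else
    let s := PySem.List.pyGetD indexes 0 0
    let out := (flsLoop w_indexes (PySem.List.slice indexes (some 1) none) 0 ([], s)).1
    if out.length > 0 then (PySem.List.pyGetD out 0 0 - 1) :: out else out

-- ===== PORT B =====
-- B's backward while-loop: j counts down, appending w_indexes[j] while indexes[j] = indexes[j-1]+1
def flsAltRun (indexes w : List Int) : Nat → List Int → List Int
  | 0, acc => acc
  | j + 1, acc =>
    if PySem.List.pyGetD indexes ((j : Int) + 1) 0 = PySem.List.pyGetD indexes (j : Int) 0 + 1 then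
      flsAltRun indexes w j (acc ++ [PySem.List.pyGetD w ((j : Int) + 1) 0])
    else acc

def find_lexical_sequence_alt (indexes : List Int) (w_indexes : List Int) : List Int :=
  if indexes.length = 1 then w_indexes
  else
    let run := (flsAltRun indexes w_indexes (indexes.length - 1) []).reverse
    if run.length > 0 then (PySem.List.pyGetD run 0 0 - 1) :: run else []

-- ===== PRECONDITION & SPEC =====
-- Pre_ excludes exactly the inputs where Python A raises IndexError: the empty indexes list
-- (indexes[0]), and consecutive pairs at a position where w_indexes[idx+1] is out of range.
def Pre_find_lexical_sequence (indexes : List Int) (w_indexes : List Int) : Prop :=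
  indexes ≠ [] ∧ (indexes.length = 1 ∨
    ∀ j ∈ List.range (indexes.length - 1),
      indexes.getD (j + 1) 0 = indexes.getD j 0 + 1 → j + 1 < w_indexes.length)
instance (indexes : List Int) (w_indexes : List Int) : Decidable (Pre_find_lexical_sequence indexes w_indexes) := by unfold Pre_find_lexical_sequence; infer_instance
def pvWitness_find_lexical_sequence : List Int × List Int := ([1, 2, 3], [10, 11, 12])

def Spec_find_lexical_sequence (indexes : List Int) (w_indexes : List Int) (out : List Int) : Prop := out = find_lexical_sequence_alt indexes w_indexes
instance (indexes : List Int) (w_indexes : List Int) (out : List Int) : Decidable (Spec_find_lexical_sequence indexes w_indexes out) := by unfold Spec_find_lexical_sequence; infer_instance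

-- ===== CLAIM (what is proved, stated in full; the proofs are below) =====
def Claim_equal_find_lexical_sequence : Prop := ∀ (indexes : List Int) (w_indexes : List Int), Dom_find_lexical_sequence indexes w_indexes → Pre_find_lexical_sequence indexes w_indexes → Spec_find_lexical_sequence indexes w_indexes (find_lexical_sequence indexes w_indexes)

-- ===== LEMMAS AND PROOFS =====

theorem flsAltRun_acc (ix w : List Int) (j : Nat) (acc : List Int) :
    flsAltRun ix w j acc = acc ++ flsAltRun ix w j [] := by
  induction j generalizing acc with
  | zero => simp [flsAltRun]
  | succ j ih =>
    simp only [flsAltRun]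
    split
    · rw [ih (acc ++ [PySem.List.pyGetD w ((j : Int) + 1) 0]),
        ih ([] ++ [PySem.List.pyGetD w ((j : Int) + 1) 0])]
      simp
    · simp

theorem flsLoop_append (w : List Int) (l : List Int) (a : Int) (idx : Nat) (st : List Int × Int) :
    flsLoop w (l ++ [a]) idx st = flsStep w (flsLoop w l idx st) (idx + l.length) a := by
  induction l generalizing idx st with
  | nil => simp [flsLoop]
  | cons x xs ih =>
    simp only [List.cons_append, flsLoop, ih]
    congr 1
    simp; omega

theorem fls_main (indexes w : List Int) (m : Nat) (hm : m ≤ indexes.length - 1) :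
    flsLoop w ((indexes.drop 1).take m) 0 ([], PySem.List.pyGetD indexes 0 0)
      = ((flsAltRun indexes w m []).reverse, PySem.List.pyGetD indexes (m : Int) 0) := by
  induction m with
  | zero => simp [flsLoop, flsAltRun]
  | succ m ih =>
    have hmt : m < (indexes.drop 1).length := by simp; omega
    have hmi : m + 1 < indexes.length := by omega
    have htake : (indexes.drop 1).take (m + 1)
        = (indexes.drop 1).take m ++ [(indexes.drop 1)[m]] := by
      rw [List.take_add_one]
      simp
    have hget : (indexes.drop 1)[m] = indexes[m + 1]'hmi := by
      simp
    have hcast : ((m + 1 : Nat) : Int) = (m : Int) + 1 := by push_cast; ring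
    have h2 : PySem.List.pyGetD indexes ((m : Int) + 1) 0 = indexes[m + 1]'hmi := by
      rw [← hcast, PySem.List.pyGetD_natCast, List.getD_eq_getElem _ _ hmi]
    have hlen : 0 + ((indexes.drop 1).take m).length = m := by
      simp [List.length_take]; omega
    rw [htake, flsLoop_append, ih (by omega), hlen, hget]
    simp only [flsStep, flsAltRun]
    by_cases hc : PySem.List.pyGetD indexes ((m : Int) + 1) 0
        = PySem.List.pyGetD indexes (m : Int) 0 + 1
    · have hcA : PySem.List.pyGetD indexes (m : Int) 0 - indexes[m + 1]'hmi = -1 := by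
        omega
      rw [if_pos hcA, if_pos hc]
      simp only [Prod.mk.injEq]
      refine ⟨?_, by rw [hcast, h2]⟩
      rw [flsAltRun_acc indexes w m ([] ++ [PySem.List.pyGetD w ((m : Int) + 1) 0])]
      simp
    · have hcA : ¬ (PySem.List.pyGetD indexes (m : Int) 0 - indexes[m + 1]'hmi = -1) := by
        omega
      rw [if_neg hcA, if_neg hc]
      simp only [Prod.mk.injEq]
      refine ⟨by simp, by rw [hcast, h2]⟩

-- ===== VERDICT (by name: the statement is the Claim_ definition above) =====
theorem find_lexical_sequence_spec : Claim_equal_find_lexical_sequence := by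
  intro indexes w_indexes _ hpre
  unfold Spec_find_lexical_sequence find_lexical_sequence find_lexical_sequence_alt
  by_cases h1 : indexes.length = 1
  · simp [h1]
  · rw [if_neg h1, if_neg h1]
    have hslice : PySem.List.slice indexes (some 1) none = indexes.drop 1 := by
      have := PySem.List.slice_from_natCast (xs := indexes) (a := 1)
      simpa using this
    have hfull : (indexes.drop 1).take (indexes.length - 1) = indexes.drop 1 := by
      apply List.take_of_length_le; simp
    have hmain := fls_main indexes w_indexes (indexes.length - 1) (le_refl _)
    rw [hfull] at hmain
    rw [hslice]
    simp only [hmain]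
    split_ifs with h
    · rfl
    · exact List.eq_nil_of_length_eq_zero (by omega)
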